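-- pv_equiv track=rewrite | github.com/AIVLE-School5-DX8-Study/Codingtest-Study | 코딩마스터스 1차/안성익/중급/_8644_문자열_복사.py | possible_list
-- ===== SOURCE A (Python) =====
-- def possible_list(stack_instr:list, stack_outstr:list,update_string:tuple) -> list:
--     temp = []
--     for idx, val in enumerate(stack_instr):
--         if idx in update_string:
--             temp.append(min(val*2, stack_outstr[idx]))
--         else:
--             temp.append(val)
--     return temp
-- ===== SOURCE B (Python) =====
-- def possible_list(stack_instr: list, stack_outstr: list, update_string: tuple) -> list:
--     temp = list(stack_instr)
--     for idx in update_string: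
--         if 0 <= idx < len(stack_instr):
--             temp[idx] = min(stack_instr[idx] * 2, stack_outstr[idx])
--     return temp
-- ===== Notes on version B (the rewrite author's own statement) =====
-- stated objective: faster
-- what changed: B copies the whole list once and then patches only the positions named in update_string (recomputing each patch from the original lists), instead of scanning every position and testing 'idx in update_string' for each; Pre_ excludes inputs where some in-range index of stack_instr listed in update_string is out of range for stack_outstr, on which both programs raise IndexError.
import Mathlib
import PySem

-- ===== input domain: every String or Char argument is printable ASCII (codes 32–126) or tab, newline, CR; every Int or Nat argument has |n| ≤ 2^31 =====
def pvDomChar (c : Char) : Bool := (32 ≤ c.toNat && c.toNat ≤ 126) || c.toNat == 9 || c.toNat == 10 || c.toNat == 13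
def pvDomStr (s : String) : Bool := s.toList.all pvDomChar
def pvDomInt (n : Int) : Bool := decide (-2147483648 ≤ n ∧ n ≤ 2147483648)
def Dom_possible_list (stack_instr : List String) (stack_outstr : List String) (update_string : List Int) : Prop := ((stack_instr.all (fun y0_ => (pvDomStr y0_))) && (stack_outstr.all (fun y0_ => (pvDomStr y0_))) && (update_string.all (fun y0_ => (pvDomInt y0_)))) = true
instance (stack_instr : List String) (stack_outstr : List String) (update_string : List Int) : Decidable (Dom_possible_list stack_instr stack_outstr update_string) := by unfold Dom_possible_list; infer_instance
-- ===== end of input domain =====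

-- B copies the whole list once and then patches only the positions named in update_string,
-- instead of scanning every position and testing membership in update_string (alternative decomposition).

-- ===== PORT A =====
-- for idx, val in enumerate(stack_instr): if idx in update_string: temp.append(min(val*2, stack_outstr[idx])) else: temp.append(val)
-- stack_outstr[idx] is in range under Pre_; pyGetD is exact there.
def possible_list (stack_instr : List String) (stack_outstr : List String) (update_string : List Int) : List String :=
  (PySem.List.enumerate stack_instr 0).foldl
    (fun temp p =>
      if p.1 ∈ update_string then
        temp ++ [min (p.2 ++ p.2) (PySem.List.pyGetD stack_outstr p.1 "")]
      else
        temp ++ [p.2]) []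

-- ===== PORT B =====
-- temp = list(stack_instr); for idx in update_string: if 0 <= idx < len: temp[idx] = min(stack_instr[idx]*2, stack_outstr[idx])
def possible_list_alt (stack_instr : List String) (stack_outstr : List String) (update_string : List Int) : List String :=
  update_string.foldl
    (fun temp idx =>
      if 0 ≤ idx ∧ idx < (stack_instr.length : Int) then
        temp.set idx.toNat
          (min (PySem.List.pyGetD stack_instr idx "" ++ PySem.List.pyGetD stack_instr idx "")
               (PySem.List.pyGetD stack_outstr idx ""))
      else temp) stack_instr

-- ===== PRECONDITION & SPEC =====
-- Pre_ excludes exactly the inputs on which Python A raises IndexError: some index of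
-- stack_instr listed in update_string that is out of range for stack_outstr.
def Pre_possible_list (stack_instr : List String) (stack_outstr : List String) (update_string : List Int) : Prop :=
  ∀ i ∈ update_string, 0 ≤ i → i < (stack_instr.length : Int) → i < (stack_outstr.length : Int)
instance (stack_instr : List String) (stack_outstr : List String) (update_string : List Int) : Decidable (Pre_possible_list stack_instr stack_outstr update_string) := by unfold Pre_possible_list; infer_instance

def pvWitness_possible_list : List String × List String × List Int := (["ab", "c"], ["x", "y"], [0])

def Spec_possible_list (stack_instr : List String) (stack_outstr : List String) (update_string : List Int) (out : List String) : Prop := out = possible_list_alt stack_instr stack_outstr update_string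
instance (stack_instr : List String) (stack_outstr : List String) (update_string : List Int) (out : List String) : Decidable (Spec_possible_list stack_instr stack_outstr update_string out) := by unfold Spec_possible_list; infer_instance

-- ===== CLAIM (what is proved, stated in full; the proofs are below) =====
def Claim_equal_possible_list : Prop := ∀ (stack_instr : List String) (stack_outstr : List String) (update_string : List Int), Dom_possible_list stack_instr stack_outstr update_string → Pre_possible_list stack_instr stack_outstr update_string → Spec_possible_list stack_instr stack_outstr update_string (possible_list stack_instr stack_outstr update_string)

-- ===== LEMMAS AND PROOFS =====

-- the patched value, recomputed from the original lists
def pvPatch (stack_instr stack_outstr : List String) (i : Int) : String :=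
  min (PySem.List.pyGetD stack_instr i "" ++ PySem.List.pyGetD stack_instr i "")
      (PySem.List.pyGetD stack_outstr i "")

theorem pvB_length (stack_instr stack_outstr : List String) (us : List Int) (temp : List String) :
    (us.foldl
      (fun temp idx =>
        if 0 ≤ idx ∧ idx < (stack_instr.length : Int) then
          temp.set idx.toNat (pvPatch stack_instr stack_outstr idx)
        else temp) temp).length = temp.length := by
  induction us generalizing temp with
  | nil => rfl
  | cons u us ih =>
      simp only [List.foldl_cons]
      rw [ih]
      split_ifs <;> simp

theorem pvB_get (stack_instr stack_outstr : List String) (us : List Int) (temp : List String)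
    (hlen : temp.length = stack_instr.length) (i : Nat) (hi : i < stack_instr.length) :
    (us.foldl
      (fun temp idx =>
        if 0 ≤ idx ∧ idx < (stack_instr.length : Int) then
          temp.set idx.toNat (pvPatch stack_instr stack_outstr idx)
        else temp) temp)[i]? =
    if (i : Int) ∈ us then some (pvPatch stack_instr stack_outstr i) else temp[i]? := by
  induction us generalizing temp with
  | nil => simp
  | cons u us ih =>
      simp only [List.foldl_cons]
      by_cases hcond : 0 ≤ u ∧ u < (stack_instr.length : Int)
      · rw [if_pos hcond, ih _ (by simp [hlen])]
        by_cases hmem : (i : Int) ∈ us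
        · simp [hmem, List.mem_cons, Or.inr hmem]
        · by_cases heq : u = (i : Int)
          · have ht : u.toNat = i := by omega
            simp [hmem, ht, List.getElem?_set, hlen, hi, heq, List.mem_cons]
          · have hne : u.toNat ≠ i := by omega
            have heq' : (i : Int) ≠ u := fun h => heq h.symm
            simp [hmem, List.getElem?_set, hne, heq, heq', List.mem_cons]
      · rw [if_neg hcond, ih _ hlen]
        have heq : u ≠ (i : Int) := by
          intro h; subst h
          exact hcond ⟨Int.natCast_nonneg i, by exact_mod_cast hi⟩
        simp [List.mem_cons, heq.symm]

theorem pvA_eq_map (stack_instr stack_outstr : List String) (us : List Int) :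
    possible_list stack_instr stack_outstr us =
    (PySem.List.enumerate stack_instr 0).map
      (fun p => if p.1 ∈ us then min (p.2 ++ p.2) (PySem.List.pyGetD stack_outstr p.1 "") else p.2) := by
  unfold possible_list
  have : (fun (temp : List String) (p : Int × String) =>
      if p.1 ∈ us then temp ++ [min (p.2 ++ p.2) (PySem.List.pyGetD stack_outstr p.1 "")] else temp ++ [p.2])
      = (fun temp p => temp ++ [if p.1 ∈ us then min (p.2 ++ p.2) (PySem.List.pyGetD stack_outstr p.1 "") else p.2]) := by
    funext temp p; split_ifs <;> rfl
  rw [this, PySem.List.foldl_append_singleton_eq_map]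
  simp

-- ===== VERDICT (by name: the statement is the Claim_ definition above) =====
theorem possible_list_spec : Claim_equal_possible_list := by
  intro instr outstr us _ _
  unfold Spec_possible_list
  rw [pvA_eq_map]
  unfold possible_list_alt
  apply List.ext_getElem?
  intro i
  by_cases hi : i < instr.length
  · have hb := pvB_get instr outstr us instr rfl i hi
    simp only [pvPatch] at hb
    rw [hb, List.getElem?_map, PySem.List.getElem?_enumerate]
    have hinstr : instr[i]? = some instr[i] := List.getElem?_eq_getElem hi
    by_cases hmem : (i : Int) ∈ us
    · simp [hinstr, hmem, PySem.List.pyGetD_natCast, List.getD, hinstr]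
    · simp [hinstr, hmem]
  · have hB : (us.foldl
        (fun temp idx =>
          if 0 ≤ idx ∧ idx < (instr.length : Int) then
            temp.set idx.toNat
              (min (PySem.List.pyGetD instr idx "" ++ PySem.List.pyGetD instr idx "")
                   (PySem.List.pyGetD outstr idx "")) else temp) instr).length = instr.length :=
      pvB_length instr outstr us instr
    rw [List.getElem?_eq_none (by simp; omega), List.getElem?_eq_none (by rw [hB]; omega)]
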